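-- pv_equiv track=rewrite | github.com/jcraig949jfi/Prometheus | cartography/shared/scripts/v2/hecke_graph_analysis.py | classify_local_geometry
-- ===== SOURCE A (Python) =====
-- def classify_local_geometry(adj, level_forms):
--     """For a set of forms at one level, classify as flat/curved/linear."""
--     forms = list(level_forms)
--     n = len(forms)
--     if n < 3:
--         return "pair" if n == 2 else "singleton"
--
--     # Count edges among these forms
--     edges = 0
--     for i, a in enumerate(forms):
--         for b in forms[i+1:]:
--             if b in adj.get(a, set()):
--                 edges += 1
--
--     max_edges = n * (n - 1) // 2
--
--     # Check degree sequence within the local subgraph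
--     local_deg = []
--     for f in forms:
--         d = sum(1 for g in forms if g != f and g in adj.get(f, set()))
--         local_deg.append(d)
--
--     if edges == max_edges:
--         return "flat"  # complete graph — all pairs congruent
--     elif max(local_deg) <= 2 and edges == n - 1:
--         return "linear"  # path graph
--     elif edges == n - 1:
--         return "tree"  # tree (could be star, etc.)
--     elif edges < max_edges * 0.5:
--         return "sparse"
--     else:
--         return "curved"  # partial connectivity, not complete
-- ===== SOURCE B (Python) =====
-- def classify_local_geometry(adj, level_forms):
--     """For a set of forms at one level, classify as flat/curved/linear."""
--     forms = list(level_forms)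
--     n = len(forms)
--     if n < 3:
--         return "pair" if n == 2 else "singleton"
--
--     # Multiplicity of each form value (forms may repeat).
--     cnt = {}
--     for f in forms:
--         cnt[f] = cnt.get(f, 0) + 1
--
--     # Edges: one backward sweep with a suffix counter instead of the O(n^2)
--     # pair scan; for position i it adds, per distinct neighbour x of forms[i],
--     # the number of later occurrences of x.
--     edges = 0
--     suffix = {}
--     for f in reversed(forms):
--         for x in adj.get(f, ()):
--             edges += suffix.get(x, 0)
--         suffix[f] = suffix.get(f, 0) + 1
--
--     # Local degree of f, read off the neighbour set and the counter.
--     degmax = max(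
--         sum(cnt.get(x, 0) for x in adj.get(f, ()) if x != f) for f in forms
--     )
--
--     max_edges = n * (n - 1) // 2
--     if edges == max_edges:
--         return "flat"
--     if edges == n - 1:
--         return "linear" if degmax <= 2 else "tree"
--     if 2 * edges < max_edges:
--         return "sparse"
--     return "curved"
-- ===== Notes on version B (the rewrite author's own statement) =====
-- stated objective: faster
-- what changed: A's O(n^2) pair scan and per-form rescan of forms are replaced by one backward sweep with a suffix counter (edges) and a multiplicity counter read off each neighbour set (degrees), touching each adjacency entry once.
-- outside the precondition, e.g. on classify_local_geometry({1: [2, 2], 2: [1], 3: []}, [1, 2, 3]): A returns 'sparse', B returns 'linear'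
import Mathlib
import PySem

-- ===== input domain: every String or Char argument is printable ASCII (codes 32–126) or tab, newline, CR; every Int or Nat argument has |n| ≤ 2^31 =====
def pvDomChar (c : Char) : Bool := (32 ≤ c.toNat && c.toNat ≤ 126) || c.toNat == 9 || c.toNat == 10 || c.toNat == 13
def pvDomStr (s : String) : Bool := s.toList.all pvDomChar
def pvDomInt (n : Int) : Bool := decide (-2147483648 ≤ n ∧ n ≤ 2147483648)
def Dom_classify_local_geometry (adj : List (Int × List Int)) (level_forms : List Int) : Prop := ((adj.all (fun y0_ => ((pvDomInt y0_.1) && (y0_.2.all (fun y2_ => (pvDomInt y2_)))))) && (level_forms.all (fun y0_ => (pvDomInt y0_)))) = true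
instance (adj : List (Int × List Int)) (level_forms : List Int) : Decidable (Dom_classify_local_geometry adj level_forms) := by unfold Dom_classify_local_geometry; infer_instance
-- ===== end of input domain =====

-- B replaces A's O(n^2) pair scan and per-form rescans by one backward sweep with a
-- suffix counter and counter lookups over the neighbour sets (objective: faster).

-- ===== PORT A =====
-- the nested 'for i, a in enumerate(forms): for b in forms[i+1:]' edge count
def pvEdgesA (adj : List (Int × List Int)) : List Int → Int
  | [] => 0
  | a :: rest =>
      rest.foldl (fun acc b => if b ∈ (PySem.Dict.mk adj).getD a [] then acc + 1 else acc) 0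
        + pvEdgesA adj rest

-- d = sum(1 for g in forms if g != f and g in adj.get(f, set()))
def pvDegA (adj : List (Int × List Int)) (forms : List Int) (f : Int) : Int :=
  forms.foldl (fun d g => if g ≠ f ∧ g ∈ (PySem.Dict.mk adj).getD f [] then d + 1 else d) 0

def classify_local_geometry (adj : List (Int × List Int)) (level_forms : List Int) : String :=
  let forms := level_forms
  let n : Int := forms.length
  if n < 3 then (if n = 2 then "pair" else "singleton")
  else
    let edges := pvEdgesA adj forms
    let max_edges := PySem.Int.floordiv (n * (n - 1)) 2
    let local_deg := forms.map (fun f => pvDegA adj forms f)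
    if edges = max_edges then "flat"
    -- max(local_deg): local_deg is nonempty here (n ≥ 3), so the .getD default is never used
    else if (PySem.List.max? local_deg (fun y => y)).getD 0 ≤ 2 ∧ edges = n - 1 then "linear"
    else if edges = n - 1 then "tree"
    -- 'edges < max_edges * 0.5' on integers: exact as 2 * edges < max_edges (0.5*max_edges is an exact float at these magnitudes)
    else if 2 * edges < max_edges then "sparse"
    else "curved"

-- ===== PORT B =====
-- cnt[f] = cnt.get(f, 0) + 1 over forms
def pvCntB (forms : List Int) : PySem.Dict Int Int :=
  forms.foldl (fun d f => d.modify f 0 (fun c => c + 1)) PySem.Dict.empty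

-- one step of the backward sweep: add suffix counts of f's neighbours, then bump suffix[f]
def pvEdgeStepB (adj : List (Int × List Int)) (st : Int × PySem.Dict Int Int) (f : Int) :
    Int × PySem.Dict Int Int :=
  (((PySem.Dict.mk adj).getD f []).foldl (fun e x => e + st.2.getD x 0) st.1,
   st.2.modify f 0 (fun c => c + 1))

def pvEdgesB (adj : List (Int × List Int)) (forms : List Int) : Int :=
  (forms.reverse.foldl (pvEdgeStepB adj) (0, PySem.Dict.empty)).1

-- sum(cnt.get(x, 0) for x in adj.get(f, ()) if x != f)
def pvDegB (adj : List (Int × List Int)) (cnt : PySem.Dict Int Int) (f : Int) : Int :=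
  (((PySem.Dict.mk adj).getD f []).filter (fun x => x ≠ f)).foldl (fun s x => s + cnt.getD x 0) 0

def classify_local_geometry_alt (adj : List (Int × List Int)) (level_forms : List Int) : String :=
  let forms := level_forms
  let n : Int := forms.length
  if n < 3 then (if n = 2 then "pair" else "singleton")
  else
    let cnt := pvCntB forms
    let edges := pvEdgesB adj forms
    let degmax := (PySem.List.max? (forms.map (fun f => pvDegB adj cnt f)) (fun y => y)).getD 0
    let max_edges := PySem.Int.floordiv (n * (n - 1)) 2
    if edges = max_edges then "flat"
    else if edges = n - 1 then (if degmax ≤ 2 then "linear" else "tree")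
    else if 2 * edges < max_edges then "sparse"
    else "curved"

-- ===== PRECONDITION & SPEC =====
-- Pre_ excludes only Lean encodings in which an adjacency value list repeats a neighbour:
-- in Python adj's values are sets, which cannot contain duplicates, and on such a list B's
-- per-neighbour counter sums would double-count where A's membership tests do not.
def Pre_classify_local_geometry (adj : List (Int × List Int)) (level_forms : List Int) : Prop :=
  ∀ p ∈ adj, p.2.Nodup
instance (adj : List (Int × List Int)) (level_forms : List Int) : Decidable (Pre_classify_local_geometry adj level_forms) := by unfold Pre_classify_local_geometry; infer_instance
def pvWitness_classify_local_geometry : (List (Int × List Int)) × List Int :=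
  ([(1, [2]), (2, [1, 3]), (3, [2])], [1, 2, 3])

def Spec_classify_local_geometry (adj : List (Int × List Int)) (level_forms : List Int) (out : String) : Prop := out = classify_local_geometry_alt adj level_forms
instance (adj : List (Int × List Int)) (level_forms : List Int) (out : String) : Decidable (Spec_classify_local_geometry adj level_forms out) := by unfold Spec_classify_local_geometry; infer_instance

-- ===== CLAIM (what is proved, stated in full; the proofs are below) =====
def Claim_equal_classify_local_geometry : Prop := ∀ (adj : List (Int × List Int)) (level_forms : List Int), Dom_classify_local_geometry adj level_forms → Pre_classify_local_geometry adj level_forms → Spec_classify_local_geometry adj level_forms (classify_local_geometry adj level_forms)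

-- ===== LEMMAS AND PROOFS =====
-- double counting: for a duplicate-free S, summing r's multiplicities over S counts r's members in S
lemma pv_ind_sum (S : List Int) (h : S.Nodup) (b : Int) :
    (S.map (fun x => if x = b then (1:Int) else 0)).sum = (if b ∈ S then (1:Int) else 0) := by
  induction S with
  | nil => simp
  | cons a t ih =>
    simp only [List.map_cons, List.sum_cons, List.mem_cons]
    rcases List.nodup_cons.mp h with ⟨ha, ht⟩
    by_cases hab : a = b
    · subst hab
      have : (t.map (fun x => if x = a then (1:Int) else 0)).sum = 0 := by
        rw [ih ht]; simp [ha]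
      simp [this, ha]
    · simp only [hab, if_false, zero_add, ih ht]
      have : (b = a ∨ b ∈ t) ↔ b ∈ t := by
        constructor
        · rintro (rfl | hb); · exact absurd rfl hab
          exact hb
        · exact Or.inr
      rw [if_congr this rfl rfl]

lemma pv_sum_count (S r : List Int) (h : S.Nodup) :
    (S.map (fun x => ((r.count x : Int)))).sum = ((r.countP (fun b => decide (b ∈ S)) : Int)) := by
  induction r with
  | nil => simp
  | cons b t ih =>
    have h1 : (S.map (fun x => ((b :: t).count x : Int))) =
        (S.map (fun x => ((t.count x : Int) + if x = b then 1 else 0))) := by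
      apply List.map_congr_left; intro x hx
      simp [List.count_cons]
      split <;> simp <;> omega
    rw [h1, List.sum_map_add, ih, pv_ind_sum S h b, List.countP_cons]
    by_cases hb : b ∈ S <;> simp [hb]

-- proof-side name for the suffix-counter update
def pvBump (d : PySem.Dict Int Int) (l : List Int) : PySem.Dict Int Int :=
  l.foldl (fun d x => d.modify x 0 (fun c => c + 1)) d

-- ghost edge count of B's sweep
def pvE (adj : List (Int × List Int)) : List Int → PySem.Dict Int Int → Int
  | [], _ => 0
  | f :: r, d =>
      pvE adj r d + (((PySem.Dict.mk adj).getD f []).map (fun x => (pvBump d r.reverse).getD x 0)).sum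

lemma pv_edgesB_fold (adj : List (Int × List Int)) :
    ∀ (l : List Int) (a : Int) (d : PySem.Dict Int Int),
      l.reverse.foldl (pvEdgeStepB adj) (a, d) = (a + pvE adj l d, pvBump d l.reverse) := by
  intro l
  induction l with
  | nil => intro a d; simp [pvE, pvBump]
  | cons f r ih =>
    intro a d
    simp only [List.reverse_cons, List.foldl_append, ih]
    simp only [pvEdgeStepB, pvE, List.foldl_cons, List.foldl_nil]
    refine Prod.ext ?_ ?_
    · simp only [PySem.List.foldl_add]
      ring
    · simp [pvBump, List.foldl_append]

lemma pv_adj_nodup (adj : List (Int × List Int)) (h : ∀ p ∈ adj, p.2.Nodup) (f : Int) :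
    ((PySem.Dict.mk adj).getD f []).Nodup := by
  simp only [PySem.Dict.getD, PySem.Dict.get?]
  cases hf : List.find? (fun p => p.1 == f) (PySem.Dict.mk adj).items with
  | none => simp
  | some p =>
    simp only [Option.map_some, Option.getD_some]
    exact h p (List.mem_of_find?_eq_some hf)

lemma pv_inner_countP (S l : List Int) (a : Int) :
    l.foldl (fun acc b => if b ∈ S then acc + 1 else acc) a = a + l.countP (fun b => decide (b ∈ S)) := by
  have h1 : (fun (acc : Int) b => if b ∈ S then acc + 1 else acc)
      = (fun (acc : Int) b => if (fun b => decide (b ∈ S)) b = true then acc + 1 else acc) := by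
    funext acc b; simp
  rw [h1, PySem.List.foldl_count_if]

lemma pv_edges_eq (adj : List (Int × List Int)) (h : ∀ p ∈ adj, p.2.Nodup) (forms : List Int) :
    pvEdgesB adj forms = pvEdgesA adj forms := by
  unfold pvEdgesB
  rw [pv_edgesB_fold adj forms 0 PySem.Dict.empty]
  simp only [zero_add]
  induction forms with
  | nil => simp [pvE, pvEdgesA]
  | cons f r ih =>
    simp only [pvE, pvEdgesA, ih]
    have hcnt : ∀ x : Int, (pvBump PySem.Dict.empty r.reverse).getD x 0 = (r.count x : Int) := by
      intro x
      have : pvBump PySem.Dict.empty r.reverse = PySem.Dict.counter r.reverse := rfl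
      rw [this, PySem.Dict.getD_counter, List.count_reverse]
    have hmap : (((PySem.Dict.mk adj).getD f []).map (fun x => (pvBump PySem.Dict.empty r.reverse).getD x 0))
        = (((PySem.Dict.mk adj).getD f []).map (fun x => (r.count x : Int))) := by
      apply List.map_congr_left; intro x _; exact hcnt x
    rw [hmap, pv_sum_count _ r (pv_adj_nodup adj h f), pv_inner_countP]
    ring

lemma pv_deg_eq (adj : List (Int × List Int)) (h : ∀ p ∈ adj, p.2.Nodup) (forms : List Int) (f : Int) :
    pvDegB adj (pvCntB forms) f = pvDegA adj forms f := by
  unfold pvDegB pvDegA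
  have hcnt : pvCntB forms = PySem.Dict.counter forms := rfl
  rw [hcnt, PySem.List.foldl_add, zero_add]
  have hmap : ((((PySem.Dict.mk adj).getD f []).filter (fun x => x ≠ f)).map
      (fun x => (PySem.Dict.counter forms).getD x 0))
      = ((((PySem.Dict.mk adj).getD f []).filter (fun x => x ≠ f)).map (fun x => (forms.count x : Int))) := by
    apply List.map_congr_left; intro x _; exact PySem.Dict.getD_counter forms x
  rw [hmap, pv_sum_count _ forms ((pv_adj_nodup adj h f).filter _)]
  have h1 : (fun (d : Int) g => if g ≠ f ∧ g ∈ (PySem.Dict.mk adj).getD f [] then d + 1 else d)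
      = (fun (d : Int) g => if (fun g => decide (g ≠ f ∧ g ∈ (PySem.Dict.mk adj).getD f [])) g = true then d + 1 else d) := by
    funext d g; simp
  rw [h1, PySem.List.foldl_count_if, zero_add]
  congr 1
  apply List.countP_congr
  intro b _
  simp [List.mem_filter, and_comm]

-- ===== VERDICT (by name: the statement is the Claim_ definition above) =====
theorem classify_local_geometry_spec : Claim_equal_classify_local_geometry := by
  intro adj level_forms _hdom hpre
  unfold Spec_classify_local_geometry classify_local_geometry classify_local_geometry_alt
  simp only []
  rw [pv_edges_eq adj hpre level_forms]
  have hmap : level_forms.map (fun f => pvDegB adj (pvCntB level_forms) f)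
      = level_forms.map (fun f => pvDegA adj level_forms f) := by
    apply List.map_congr_left; intro f _; exact pv_deg_eq adj hpre level_forms f
  rw [hmap]
  split_ifs <;> first | rfl | tauto
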